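-- pv_equiv track=rewrite | github.com/Muhsin1819/HackerEarth_Solutions | Zoos/zoos.py | zoo
-- ===== SOURCE A (Python) =====
-- def zoo(str_small):
--     countz = 0
--     counto = 0
--     for i in str_small:
--         if(i == 'z'):
--             countz += 1
--         elif(i == 'o'):
--             counto += 1
--         else:
--             return("Invalid input")
--     if(counto == 2*countz):
--         return("Yes")
--     else:
--         return("No")
-- ===== SOURCE B (Python) =====
-- def zoo(str_small):
--     # Delete every letter z; what's left must delete to empty after removing every letter o, and
--     # counto == 2*countz is equivalent to 3*len(no_z) == 2*len(str_small).
--     no_z = str_small.replace('z', '')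
--     if no_z.replace('o', ''):
--         return "Invalid input"
--     return "Yes" if 3 * len(no_z) == 2 * len(str_small) else "No"
-- ===== Notes on version B (the rewrite author's own statement) =====
-- stated objective: alternative
-- what changed: Instead of counting the two letters with A's early-returning per-char loop, B deletes every z via str.replace, validates by checking that the remainder deletes to empty after also removing every o, and answers via the length equation 3*len(no_z) == 2*len(s).
import Mathlib
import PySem

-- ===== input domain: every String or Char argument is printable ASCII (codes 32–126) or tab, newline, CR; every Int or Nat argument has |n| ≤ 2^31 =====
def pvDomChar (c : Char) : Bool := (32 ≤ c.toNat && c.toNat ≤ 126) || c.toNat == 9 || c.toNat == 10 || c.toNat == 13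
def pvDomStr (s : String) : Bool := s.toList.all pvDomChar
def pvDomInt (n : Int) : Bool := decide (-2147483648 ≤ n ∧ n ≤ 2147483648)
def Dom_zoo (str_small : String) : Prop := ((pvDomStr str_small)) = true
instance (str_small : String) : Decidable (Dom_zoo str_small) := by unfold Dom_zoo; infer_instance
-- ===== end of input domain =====

-- B deletes every letter z with str.replace, validates by checking the remainder deletes to empty,
-- and decides the ratio with the length equation 3*len(no_z) == 2*len(s) (objective: alternative).

-- ===== PORT A =====
-- A's for-loop with its two accumulators; returns "Invalid input" at the first bad char
def zooLoop : List Char → Int → Int → String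
  | [], countz, counto => if counto = 2 * countz then "Yes" else "No"
  | c :: rest, countz, counto =>
    if c = 'z' then zooLoop rest (countz + 1) counto
    else if c = 'o' then zooLoop rest countz (counto + 1)
    else "Invalid input"

def zoo (str_small : String) : String := zooLoop str_small.toList 0 0

-- ===== PORT B =====
def zoo_alt (str_small : String) : String :=
  let no_z := PySem.Str.replace str_small "z" ""            -- str_small.replace('z', '')
  if PySem.Str.len (PySem.Str.replace no_z "o" "") ≠ 0 then -- truthiness of a str = nonempty
    "Invalid input"
  else if 3 * PySem.Str.len no_z = 2 * PySem.Str.len str_small then "Yes" else "No"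

-- ===== PRECONDITION & SPEC =====
def Spec_zoo (str_small : String) (out : String) : Prop := out = zoo_alt str_small
instance (str_small : String) (out : String) : Decidable (Spec_zoo str_small out) := by unfold Spec_zoo; infer_instance

-- ===== CLAIM (what is proved, stated in full; the proofs are below) =====
def Claim_equal_zoo : Prop := ∀ (str_small : String), Dom_zoo str_small → Spec_zoo str_small (zoo str_small)

-- ===== LEMMAS AND PROOFS =====

-- replace-by-single-char with empty replacement is filter
lemma replace_go_single (z : Char) (l acc : List Char) (fuel : Nat) (h : l.length ≤ fuel) :
    PySem.Chars.replace.go [z] [] fuel l acc = acc.reverse ++ l.filter (fun x => !decide (x = z)) := by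
  induction l generalizing acc fuel with
  | nil => cases fuel <;> simp [PySem.Chars.replace.go]
  | cons c t ih =>
    cases fuel with
    | zero => simp at h
    | succ fuel =>
      simp only [List.length_cons, Nat.succ_le_succ_iff] at h
      rw [PySem.Chars.replace.go]
      by_cases hc : c = z
      · subst hc
        have hp : [c].isPrefixOf (c :: t) = true := by simp [List.isPrefixOf]
        rw [hp, if_pos rfl]
        have hd : List.drop [c].length (c :: t) = t := by simp
        rw [hd, show ([] : List Char).reverse ++ acc = acc by simp, ih _ _ h]
        simp
      · have hp : [z].isPrefixOf (c :: t) = false := by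
          simp [List.isPrefixOf]
          exact fun h' => (hc h'.symm).elim
        rw [hp]
        simp only [Bool.false_eq_true, if_false]
        rw [ih _ _ h]
        simp [hc]

lemma replace_single (z : Char) (l : List Char) :
    PySem.Chars.replace l [z] [] = l.filter (fun x => !decide (x = z)) := by
  rw [PySem.Chars.replace]
  simp only [List.isEmpty_cons, Bool.false_eq_true, if_false]
  exact replace_go_single z l [] l.length le_rfl

-- on an all-z/o list the two counts add up to the length
lemma count_split : ∀ (m : List Char), (∀ c ∈ m, c = 'z' ∨ c = 'o') →
    m.countP (fun x => decide (x = 'z')) + m.countP (fun x => decide (x = 'o')) = m.length := by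
  intro m
  induction m with
  | nil => intro _; simp
  | cons c t ih =>
    intro hm
    have ht := ih (fun d hd => hm d (List.mem_cons_of_mem _ hd))
    rcases hm c List.mem_cons_self with h | h <;> subst h
    · rw [List.countP_cons_of_pos (p := fun x => decide (x = 'z')) (by decide),
        List.countP_cons_of_neg (p := fun x => decide (x = 'o')) (by decide), List.length_cons]
      omega
    · rw [List.countP_cons_of_neg (p := fun x => decide (x = 'z')) (by decide),
        List.countP_cons_of_pos (p := fun x => decide (x = 'o')) (by decide), List.length_cons]
      omega

-- A's loop in closed form: invalid iff some char is neither 'z' nor 'o', else the count test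
lemma zooLoop_eq (l : List Char) : ∀ (cz co : Int),
    zooLoop l cz co =
      if ¬ (∀ c ∈ l, c = 'z' ∨ c = 'o') then "Invalid input"
      else if co + l.countP (fun x => decide (x = 'o')) = 2 * (cz + l.countP (fun x => decide (x = 'z'))) then "Yes" else "No" := by
  induction l with
  | nil => intro cz co; simp [zooLoop]
  | cons c rest ih =>
    intro cz co
    by_cases hz : c = 'z'
    · subst hz
      rw [zooLoop, if_pos rfl, ih]
      by_cases hall : ∀ c ∈ rest, c = 'z' ∨ c = 'o'
      · have hallc : ∀ c ∈ ('z' :: rest), c = 'z' ∨ c = 'o' := by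
          intro c hc
          rcases List.mem_cons.1 hc with h | h
          · exact Or.inl h
          · exact hall c h
        rw [if_neg (not_not_intro hall), if_neg (not_not_intro hallc),
          List.countP_cons_of_pos (p := fun x => decide (x = 'z')) (by decide),
          List.countP_cons_of_neg (p := fun x => decide (x = 'o')) (by decide)]
        exact if_congr (by push_cast; omega) rfl rfl
      · have hallc : ¬ ∀ c ∈ ('z' :: rest), c = 'z' ∨ c = 'o' :=
          fun h => hall fun c hc => h c (List.mem_cons_of_mem _ hc)
        rw [if_pos hall, if_pos hallc]
    · by_cases ho : c = 'o'
      · subst ho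
        rw [zooLoop, if_neg (by decide), if_pos rfl, ih]
        by_cases hall : ∀ c ∈ rest, c = 'z' ∨ c = 'o'
        · have hallc : ∀ c ∈ ('o' :: rest), c = 'z' ∨ c = 'o' := by
            intro c hc
            rcases List.mem_cons.1 hc with h | h
            · exact Or.inr h
            · exact hall c h
          rw [if_neg (not_not_intro hall), if_neg (not_not_intro hallc),
            List.countP_cons_of_neg (p := fun x => decide (x = 'z')) (by decide),
            List.countP_cons_of_pos (p := fun x => decide (x = 'o')) (by decide)]
          exact if_congr (by push_cast; omega) rfl rfl
        · have hallc : ¬ ∀ c ∈ ('o' :: rest), c = 'z' ∨ c = 'o' :=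
            fun h => hall fun c hc => h c (List.mem_cons_of_mem _ hc)
          rw [if_pos hall, if_pos hallc]
      · rw [zooLoop, if_neg hz, if_neg ho, if_pos]
        intro hall
        rcases hall c List.mem_cons_self with h | h
        · exact hz h
        · exact ho h

theorem zoo_spec : Claim_equal_zoo := by
  intro s _
  unfold Spec_zoo zoo zoo_alt
  rw [zooLoop_eq]
  set l := s.toList with hl
  have hz : (PySem.Str.replace s "z" "").toList = l.filter (fun x => !decide (x = 'z')) := by
    rw [PySem.Str.toList_replace]
    simpa using replace_single 'z' l
  have ho : (PySem.Str.replace (PySem.Str.replace s "z" "") "o" "").toList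
      = (l.filter (fun x => !decide (x = 'z'))).filter (fun x => !decide (x = 'o')) := by
    rw [PySem.Str.toList_replace, hz]
    simpa using replace_single 'o' (l.filter (fun x => !decide (x = 'z')))
  simp only [PySem.Str.len, ho, hz, ← hl]
  by_cases hall : ∀ c ∈ l, c = 'z' ∨ c = 'o'
  · -- valid: the second replace is empty and the length equation is the count test
    have hempty : ((l.filter (fun x => !decide (x = 'z'))).filter (fun x => !decide (x = 'o'))).length = 0 := by
      rw [List.length_eq_zero_iff, List.filter_filter, List.filter_eq_nil_iff]
      intro c hc
      rcases hall c hc with h | h <;> simp [h]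
    have hcnt : (l.filter (fun x => !decide (x = 'z'))).length = l.countP (fun x => decide (x = 'o')) := by
      rw [← List.countP_eq_length_filter]
      exact List.countP_congr (fun c hc => by
        rcases hall c hc with h | h <;> simp [h])
    have hlen := count_split l hall
    rw [if_neg (not_not_intro hall), hempty, hcnt,
      if_neg (by norm_num : ¬ ((0 : Nat) : Int) ≠ 0)]
    exact if_congr (by omega) rfl rfl
  · -- invalid: the second replace is nonempty
    have hne : ((l.filter (fun x => !decide (x = 'z'))).filter (fun x => !decide (x = 'o'))).length ≠ 0 := by
      rw [Ne, List.length_eq_zero_iff, List.filter_filter, List.filter_eq_nil_iff]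
      intro hcontra
      apply hall
      intro c hc
      have := hcontra c hc
      by_cases h1 : c = 'z'
      · exact Or.inl h1
      · right
        by_contra h2
        simp [h1, h2] at this
    rw [if_pos hall, if_pos (by exact_mod_cast hne)]
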